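-- pv_equiv track=rewrite | github.com/vik061/VictorsRandomTriviaSurvivalGame | game.py | make_start_and_easy_board_coordinates
-- ===== SOURCE A (Python) =====
-- def make_start_and_easy_board_coordinates(rows: int, columns: int) -> dict[tuple[int, int], str]:
--     """
--     Make the start and easy board coordinates for the game board.
--
--     :param rows: an integer
--     :param columns: an integer
--     :precondition: rows and columns are positive non-zero integers
--     :postcondition: make the start and easy board coordinates
--     :return: a dictionary with the tuple of (row, coordinate) as the key and a string level description as the value
--
--     >>> rows_5 = 5
--     >>> columns_5 = 5
--     >>> make_start_and_easy_board_coordinates(rows_5, columns_5)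
--     {(0, 0): 'Start (no difficulty level)', (0, 1): 'Easy', (0, 2): 'Easy', (0, 3): 'Easy', (1, 0): 'Easy', \
-- (1, 1): 'Easy', (1, 2): 'Easy', (2, 0): 'Easy', (2, 1): 'Easy'}
--     """
--     start_and_easy_board_dictionary = {}
--
--     for row_coordinate in range(rows):
--         for column_coordinate in range(columns):
--             if row_coordinate == 0 and column_coordinate == 0:
--                 start_and_easy_board_dictionary[(row_coordinate, column_coordinate)] = "Start (no difficulty level)"
--             elif (row_coordinate == 0 and column_coordinate <= 3) \
--                     or (row_coordinate == 1 and column_coordinate <= 2) \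
--                     or (row_coordinate == 2 and column_coordinate <= 1):
--                 start_and_easy_board_dictionary[(row_coordinate, column_coordinate)] = "Easy"
--     return start_and_easy_board_dictionary
-- ===== SOURCE B (Python) =====
-- _CELLS = [
--     (0, 0, "Start (no difficulty level)"),
--     (0, 1, "Easy"), (0, 2, "Easy"), (0, 3, "Easy"),
--     (1, 0, "Easy"), (1, 1, "Easy"), (1, 2, "Easy"),
--     (2, 0, "Easy"), (2, 1, "Easy"),
-- ]
--
--
-- def make_start_and_easy_board_coordinates(rows: int, columns: int) -> dict[tuple[int, int], str]:
--     # The marked cells are a fixed set of at most 9 cells; just emit the ones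
--     # that fit on the board instead of scanning all rows*columns cells.
--     return {(r, c): label for r, c, label in _CELLS if r < rows and c < columns}
-- ===== Notes on version B (the rewrite author's own statement) =====
-- stated objective: faster
-- what changed: B replaces the O(rows*columns) double scan of the whole board with a direct emission of the fixed 9-cell start/easy set, filtered by the board bounds.
import Mathlib
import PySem

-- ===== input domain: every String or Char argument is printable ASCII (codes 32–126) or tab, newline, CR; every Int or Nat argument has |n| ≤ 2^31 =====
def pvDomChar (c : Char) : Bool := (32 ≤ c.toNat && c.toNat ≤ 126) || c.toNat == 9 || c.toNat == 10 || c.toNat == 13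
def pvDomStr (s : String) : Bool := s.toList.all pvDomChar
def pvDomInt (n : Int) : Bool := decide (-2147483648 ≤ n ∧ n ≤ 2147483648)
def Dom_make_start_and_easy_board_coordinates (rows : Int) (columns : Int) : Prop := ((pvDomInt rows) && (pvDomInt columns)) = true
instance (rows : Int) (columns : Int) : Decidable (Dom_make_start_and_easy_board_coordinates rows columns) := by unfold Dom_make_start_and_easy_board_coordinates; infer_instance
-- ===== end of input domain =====

-- B replaces A's O(rows*columns) scan of the whole board with a direct emission
-- of the fixed 9-cell start/easy set filtered by the board bounds (O(1)).

-- ===== PORT A =====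
-- loop body of A's inner 'for column_coordinate' loop
def pvStepA (r : Int) (d : PySem.Dict (Int × Int) String) (c : Int) : PySem.Dict (Int × Int) String :=
  if r = 0 ∧ c = 0 then d.insert (r, c) "Start (no difficulty level)"
  else if (r = 0 ∧ c ≤ 3) ∨ (r = 1 ∧ c ≤ 2) ∨ (r = 2 ∧ c ≤ 1) then d.insert (r, c) "Easy"
  else d

-- the whole nested loop of A, starting from dict d
def pvLoopA (rows columns : Int) (d : PySem.Dict (Int × Int) String) : PySem.Dict (Int × Int) String :=
  (PySem.List.pyRange 0 rows 1).foldl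
    (fun d r => (PySem.List.pyRange 0 columns 1).foldl (pvStepA r) d) d

def make_start_and_easy_board_coordinates (rows : Int) (columns : Int) : List (Int × Int × String) :=
  (pvLoopA rows columns PySem.Dict.empty).items.map (fun p => (p.1.1, p.1.2, p.2))

-- ===== PORT B =====
def pvCells : List (Int × Int × String) :=
  [(0, 0, "Start (no difficulty level)"),
   (0, 1, "Easy"), (0, 2, "Easy"), (0, 3, "Easy"),
   (1, 0, "Easy"), (1, 1, "Easy"), (1, 2, "Easy"),
   (2, 0, "Easy"), (2, 1, "Easy")]

def make_start_and_easy_board_coordinates_alt (rows : Int) (columns : Int) : List (Int × Int × String) :=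
  pvCells.filter (fun t => decide (t.1 < rows) && decide (t.2.1 < columns))

-- ===== PRECONDITION & SPEC =====
def Spec_make_start_and_easy_board_coordinates (rows : Int) (columns : Int) (out : List (Int × Int × String)) : Prop := out = make_start_and_easy_board_coordinates_alt rows columns
instance (rows : Int) (columns : Int) (out : List (Int × Int × String)) : Decidable (Spec_make_start_and_easy_board_coordinates rows columns out) := by unfold Spec_make_start_and_easy_board_coordinates; infer_instance

-- ===== CLAIM (what is proved, stated in full; the proofs are below) =====
def Claim_equal_make_start_and_easy_board_coordinates : Prop := ∀ (rows : Int) (columns : Int), Dom_make_start_and_easy_board_coordinates rows columns → Spec_make_start_and_easy_board_coordinates rows columns (make_start_and_easy_board_coordinates rows columns)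

-- ===== LEMMAS AND PROOFS =====

-- clamp n into [0, hi]
def pvClamp (n hi : Int) : Int := if n ≤ 0 then 0 else if n ≤ hi then n else hi

theorem pvFoldl_id {α β : Type} (f : α → β → α) (l : List β)
    (h : ∀ d x, x ∈ l → f d x = d) : ∀ d, l.foldl f d = d := by
  induction l with
  | nil => intro d; rfl
  | cons x xs ih =>
      intro d
      rw [List.foldl_cons, h d x (List.mem_cons_self), ih (fun d y hy => h d y (List.mem_cons_of_mem _ hy))]

theorem pvStepA_id_of_col (r c : Int) (hc : 4 ≤ c) (d : PySem.Dict (Int × Int) String) :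
    pvStepA r d c = d := by
  unfold pvStepA
  split_ifs with h1 h2
  · omega
  · rcases h2 with ⟨_, h⟩ | ⟨_, h⟩ | ⟨_, h⟩ <;> omega
  · rfl

theorem pvStepA_id_of_row (r c : Int) (hr : 3 ≤ r) (d : PySem.Dict (Int × Int) String) :
    pvStepA r d c = d := by
  unfold pvStepA
  split_ifs with h1 h2
  · omega
  · rcases h2 with ⟨h, _⟩ | ⟨h, _⟩ | ⟨h, _⟩ <;> omega
  · rfl

theorem pvInner_id_of_row (r columns : Int) (hr : 3 ≤ r) (d : PySem.Dict (Int × Int) String) :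
    (PySem.List.pyRange 0 columns 1).foldl (pvStepA r) d = d :=
  pvFoldl_id _ _ (fun d c _ => pvStepA_id_of_row r c hr d) d

theorem pvInner_clamp (r columns : Int) (d : PySem.Dict (Int × Int) String) :
    (PySem.List.pyRange 0 columns 1).foldl (pvStepA r) d
      = (PySem.List.pyRange 0 (pvClamp columns 4) 1).foldl (pvStepA r) d := by
  unfold pvClamp
  split_ifs with h1 h2
  · rw [PySem.List.pyRange_one_eq_nil h1, PySem.List.pyRange_one_eq_nil (by omega)]
  · rfl
  · rw [PySem.List.pyRange_one_append 0 4 columns (by norm_num) (by omega), List.foldl_append]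
    exact pvFoldl_id _ _ (fun d c hc =>
      pvStepA_id_of_col r c ((PySem.List.mem_pyRange_one).1 hc).1 d) _

theorem pvLoopA_colclamp (rows columns : Int) (d : PySem.Dict (Int × Int) String) :
    pvLoopA rows columns d = pvLoopA rows (pvClamp columns 4) d := by
  unfold pvLoopA
  have : (fun (d : PySem.Dict (Int × Int) String) (r : Int) =>
      (PySem.List.pyRange 0 columns 1).foldl (pvStepA r) d)
      = fun d r => (PySem.List.pyRange 0 (pvClamp columns 4) 1).foldl (pvStepA r) d := by
    funext d r; exact pvInner_clamp r columns d
  rw [this]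

theorem pvLoopA_rowclamp (rows columns : Int) (d : PySem.Dict (Int × Int) String) :
    pvLoopA rows columns d = pvLoopA (pvClamp rows 3) columns d := by
  unfold pvLoopA pvClamp
  split_ifs with h1 h2
  · rw [PySem.List.pyRange_one_eq_nil h1]; rfl
  · rfl
  · rw [PySem.List.pyRange_one_append 0 3 rows (by norm_num) (by omega), List.foldl_append]
    exact pvFoldl_id _ _ (fun d r hr =>
      pvInner_id_of_row r _ ((PySem.List.mem_pyRange_one).1 hr).1 d) _

theorem pvLoopA_clamp (rows columns : Int) (d : PySem.Dict (Int × Int) String) :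
    pvLoopA rows columns d = pvLoopA (pvClamp rows 3) (pvClamp columns 4) d := by
  rw [pvLoopA_colclamp, pvLoopA_rowclamp]

theorem pvFinite (a b : Int) (ha0 : 0 ≤ a) (ha1 : a ≤ 3) (hb0 : 0 ≤ b) (hb1 : b ≤ 4) :
    (pvLoopA a b PySem.Dict.empty).items.map (fun p => (p.1.1, p.1.2, p.2))
      = pvCells.filter (fun t => decide (t.1 < a) && decide (t.2.1 < b)) := by
  interval_cases a <;> interval_cases b <;> decide

theorem pvClamp_bounds (n hi : Int) (h : 0 ≤ hi) : 0 ≤ pvClamp n hi ∧ pvClamp n hi ≤ hi := by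
  unfold pvClamp; split_ifs <;> omega

theorem pvLt_clamp_iff (x n hi : Int) (hx0 : 0 ≤ x) (hxh : x < hi) :
    (x < pvClamp n hi) ↔ (x < n) := by
  unfold pvClamp; split_ifs <;> omega

-- ===== VERDICT (by name: the statement is the Claim_ definition above) =====
theorem make_start_and_easy_board_coordinates_spec : Claim_equal_make_start_and_easy_board_coordinates := by
  intro rows columns _
  unfold Spec_make_start_and_easy_board_coordinates
  unfold make_start_and_easy_board_coordinates
  rw [pvLoopA_clamp]
  obtain ⟨hr0, hr1⟩ := pvClamp_bounds rows 3 (by norm_num)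
  obtain ⟨hc0, hc1⟩ := pvClamp_bounds columns 4 (by norm_num)
  rw [pvFinite _ _ hr0 hr1 hc0 hc1]
  unfold make_start_and_easy_board_coordinates_alt
  apply List.filter_congr
  intro t ht
  have hfacts : 0 ≤ t.1 ∧ t.1 < 3 ∧ 0 ≤ t.2.1 ∧ t.2.1 < 4 := by
    unfold pvCells at ht
    simp only [List.mem_cons, List.not_mem_nil, or_false] at ht
    rcases ht with rfl | rfl | rfl | rfl | rfl | rfl | rfl | rfl | rfl <;> decide
  obtain ⟨h1, h2, h3, h4⟩ := hfacts
  rw [decide_eq_decide.2 (pvLt_clamp_iff t.1 rows 3 h1 h2),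
      decide_eq_decide.2 (pvLt_clamp_iff t.2.1 columns 4 h3 h4)]
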